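-- pv_equiv track=rewrite | github.com/zazabap/problem-reductions | docs/paper/verify-reductions/adversary_minimum_vertex_cover_hamiltonian_circuit.py | has_hamiltonian_circuit_bt
-- ===== SOURCE A (Python) =====
-- def has_hamiltonian_circuit_bt(n: int, adj: dict[int, set[int]]) -> bool:
--     if n < 3:
--         return False
--     for v in range(n):
--         if len(adj.get(v, set())) < 2:
--             return False
--     visited = [False] * n
--     path = [0]
--     visited[0] = True
--
--     def backtrack() -> bool:
--         if len(path) == n:
--             return 0 in adj.get(path[-1], set())
--         last = path[-1]
--         for nxt in sorted(adj.get(last, set())):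
--             if not visited[nxt]:
--                 visited[nxt] = True
--                 path.append(nxt)
--                 if backtrack():
--                     return True
--                 path.pop()
--                 visited[nxt] = False
--         return False
--
--     return backtrack()
-- ===== SOURCE B (Python) =====
-- def has_hamiltonian_circuit_bt(n: int, adj: dict[int, set[int]]) -> bool:
--     if n < 3:
--         return False
--     if not all(len(adj.get(v, set())) >= 2 for v in range(n)):
--         return False
--     # Held-Karp reachability: frontier holds (visited-bitmask, endpoint) states for
--     # simple paths that start at vertex 0; grow it n-1 times, then try to close the cycle.
--     frontier = {(1, 0)}
--     for _ in range(n - 1):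
--         frontier = {(mask | (1 << u), u)
--                     for (mask, last) in frontier
--                     for u in adj.get(last, set())
--                     if not (mask >> u) & 1}
--     return any(0 in adj.get(last, set()) for (_, last) in frontier)
-- ===== Notes on version B (the rewrite author's own statement) =====
-- stated objective: alternative
-- what changed: Replaces the recursive path backtracking by an iterative Held-Karp reachability sweep: a set of (visited-bitmask, endpoint) states for simple paths from vertex 0 is grown n-1 times by a set comprehension and the cycle is closed at the end.
-- outside the precondition, e.g. on has_hamiltonian_circuit_bt(3, {0: {1, 2}, 1: {0, 2}, 2: {0, -1}}): A returns True, B raises ValueError; on has_hamiltonian_circuit_bt(3, {0: {1, 5}, 1: {0, 2}, 2: {0, 1}}): A returns True, B returns True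
import Mathlib
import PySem

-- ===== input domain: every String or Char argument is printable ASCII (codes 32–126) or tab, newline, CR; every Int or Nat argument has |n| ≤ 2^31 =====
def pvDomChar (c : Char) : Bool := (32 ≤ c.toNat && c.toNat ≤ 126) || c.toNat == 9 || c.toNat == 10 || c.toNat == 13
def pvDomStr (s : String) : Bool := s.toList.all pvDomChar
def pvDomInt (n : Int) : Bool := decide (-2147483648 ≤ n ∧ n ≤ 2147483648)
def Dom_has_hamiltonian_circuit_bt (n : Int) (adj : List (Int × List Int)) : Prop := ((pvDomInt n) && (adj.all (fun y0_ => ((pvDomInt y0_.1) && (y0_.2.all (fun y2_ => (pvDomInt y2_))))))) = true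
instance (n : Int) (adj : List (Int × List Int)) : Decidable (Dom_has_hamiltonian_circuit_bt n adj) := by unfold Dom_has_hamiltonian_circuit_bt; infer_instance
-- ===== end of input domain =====

-- B replaces A's recursive path backtracking by an iterative Held-Karp sweep over
-- (visited-bitmask, endpoint) states; on inputs admitted by Pre_ the return values agree.

-- ===== PORT A =====
-- `adj.get(v, set())`: dict lookup on the association list (first match), default empty set
def pvGetAdj (adj : List (Int × List Int)) (v : Int) : List Int :=
  ((adj.find? (fun p => p.1 == v)).map Prod.snd).getD []

-- `for v in range(n): if len(adj.get(v, set())) < 2: return False` (early-exit scan)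
def pvDegScanA (adj : List (Int × List Int)) : Nat → Int → Bool
  | 0, _ => true
  | k + 1, v =>
    if (pvGetAdj adj v).length < 2 then false else pvDegScanA adj k (v + 1)

-- `return 0 in adj.get(path[-1], set())`
def pvCloseA (adj : List (Int × List Int)) (path : List Int) : Bool :=
  decide ((0 : Int) ∈ pvGetAdj adj ((PySem.List.pyGet? path (-1)).getD 0))

-- `backtrack()`: the mutation of `visited`/`path` is undone on every failed branch, so the
-- loop with early `return True` is the `any` below over the same states; the fuel argument
-- (n at the top call) only bounds the recursion depth, which Python bounds by `len(path) == n`.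
-- `visited[nxt]` reads use `.getD true` where Python would raise IndexError (outside Pre_).
def pvBacktrackA (nN : Nat) (adj : List (Int × List Int)) :
    Nat → List Bool → List Int → Bool
  | 0, _, path => if path.length = nN then pvCloseA adj path else false
  | fuel + 1, visited, path =>
    if path.length = nN then pvCloseA adj path
    else
      (PySem.List.sorted
          (pvGetAdj adj ((PySem.List.pyGet? path (-1)).getD 0))
          (fun x => x) false).any
        (fun nxt =>
          !((PySem.List.pyGet? visited nxt).getD true) &&
            pvBacktrackA nN adj fuel (PySem.List.pySetD visited nxt true) (path ++ [nxt]))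

def has_hamiltonian_circuit_bt (n : Int) (adj : List (Int × List Int)) : Bool :=
  if n < 3 then false
  else if !(pvDegScanA adj n.toNat 0) then false
  else
    -- visited = [False] * n; visited[0] = True; path = [0]
    pvBacktrackA n.toNat adj n.toNat
      (PySem.List.pySetD (List.replicate n.toNat false) 0 true) [0]

-- ===== PORT B =====
-- `all(len(adj.get(v, set())) >= 2 for v in range(n))` (lazy `all`, ported as a short-circuit scan)
def pvDegAllB (adj : List (Int × List Int)) : Nat → Int → Bool
  | 0, _ => true
  | k + 1, v =>
    decide (2 ≤ (pvGetAdj adj v).length) && pvDegAllB adj k (v + 1)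

-- the set comprehension `{(mask | (1 << u), u) for (mask, last) in frontier for u in adj.get(last, set()) if not (mask >> u) & 1}`;
-- building one Set from another is order-exact; `u.toNat` is exact for the shift counts 0 ≤ u Python accepts (outside Pre_ Python raises ValueError)
def pvStepB (adj : List (Int × List Int)) (frontier : PySem.Set (Int × Int)) :
    PySem.Set (Int × Int) :=
  PySem.Set.ofList (frontier.flatMap (fun s =>
    ((pvGetAdj adj s.2).filter
        (fun u => PySem.Int.band (s.1 >>> u.toNat) 1 == 0)).map
      (fun u => (PySem.Int.bor s.1 ((1 : Int) <<< u.toNat), u))))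

def has_hamiltonian_circuit_bt_alt (n : Int) (adj : List (Int × List Int)) : Bool :=
  if n < 3 then false
  else if !(pvDegAllB adj n.toNat 0) then false
  else
    -- frontier = {(1, 0)}; for _ in range(n - 1): frontier = {...}
    -- return any(0 in adj.get(last, set()) for (_, last) in frontier)
    ((List.range (n.toNat - 1)).foldl (fun fr _ => pvStepB adj fr)
        (PySem.Set.ofList [((1 : Int), (0 : Int))])).any
      (fun s => decide ((0 : Int) ∈ pvGetAdj adj s.2))

-- ===== PRECONDITION & SPEC =====
-- Pre_ excludes graphs (n ≥ 3, every vertex of range(n) listing ≥ 2 neighbours — otherwise both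
-- programs answer False before any indexing) in which an entry with in-range key has a neighbour
-- outside range(n): a reachable such neighbour makes A raise IndexError when n ≤ x or x < -n, and
-- for a negative neighbour -n ≤ x < 0 A indexes `visited` with Python's wraparound while B's
-- `(mask >> u)` raises ValueError; unreachable out-of-range neighbours are excluded with them
-- because reachability is not a closed-form condition on the input.
def Pre_has_hamiltonian_circuit_bt (n : Int) (adj : List (Int × List Int)) : Prop :=
  3 ≤ n →
    (n ≤ adj.length ∧ ∀ v ∈ PySem.List.pyRange 0 n 1, 2 ≤ (pvGetAdj adj v).length) →
    ∀ p ∈ adj, (0 ≤ p.1 ∧ p.1 < n) → ∀ x ∈ p.2, 0 ≤ x ∧ x < n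
instance (n : Int) (adj : List (Int × List Int)) : Decidable (Pre_has_hamiltonian_circuit_bt n adj) := by unfold Pre_has_hamiltonian_circuit_bt; infer_instance

def pvWitness_has_hamiltonian_circuit_bt : Int × (List (Int × List Int)) :=
  (4, [(0, [1, 3]), (1, [0, 2]), (2, [1, 3]), (3, [2, 0])])

def Spec_has_hamiltonian_circuit_bt (n : Int) (adj : List (Int × List Int)) (out : Bool) : Prop := out = has_hamiltonian_circuit_bt_alt n adj
instance (n : Int) (adj : List (Int × List Int)) (out : Bool) : Decidable (Spec_has_hamiltonian_circuit_bt n adj out) := by unfold Spec_has_hamiltonian_circuit_bt; infer_instance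

-- ===== CLAIM (what is proved, stated in full; the proofs are below) =====
def Claim_equal_has_hamiltonian_circuit_bt : Prop := ∀ (n : Int) (adj : List (Int × List Int)), Dom_has_hamiltonian_circuit_bt n adj → Pre_has_hamiltonian_circuit_bt n adj → Spec_has_hamiltonian_circuit_bt n adj (has_hamiltonian_circuit_bt n adj)

-- ===== LEMMAS AND PROOFS =====

-- neighbour list of a vertex
def pvNb (adj : List (Int × List Int)) (v : Int) : List Int := pvGetAdj adj v

-- last element of the (always nonempty) path, as both ports read it
def pvLast (p : List Int) : Int := (PySem.List.pyGet? p (-1)).getD 0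

-- a simple path that starts at 0, stays in range(n) and follows edges
def pvGood (n : Int) (adj : List (Int × List Int)) (p : List Int) : Prop :=
  p.head? = some 0 ∧ p.Nodup ∧ (∀ x ∈ p, 0 ≤ x ∧ x < n) ∧
    p.IsChain (fun a b => b ∈ pvGetAdj adj a)

-- the Nat value of the Python bitmask of a path
def pvMaskN (p : List Int) : Nat := p.foldl (fun m v => m ||| ((1 : Nat) <<< v.toNat)) 0

lemma pvNb_range (n : Int) (adj : List (Int × List Int))
    (hadj : ∀ p ∈ adj, (0 ≤ p.1 ∧ p.1 < n) → ∀ x ∈ p.2, 0 ≤ x ∧ x < n)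
    (v : Int) (h0 : 0 ≤ v) (hv : v < n) : ∀ x ∈ pvGetAdj adj v, 0 ≤ x ∧ x < n := by
  intro x hx
  unfold pvGetAdj at hx
  cases hfind : adj.find? (fun p => p.1 == v) with
  | none => rw [hfind] at hx; simp at hx
  | some q =>
    rw [hfind] at hx
    simp only [Option.map_some, Option.getD_some] at hx
    have hmem := List.mem_of_find?_eq_some hfind
    have hkey : q.1 = v := by
      have := List.find?_some hfind
      simpa using this
    exact hadj q hmem (by omega) x hx

lemma pvLast_append (p : List Int) (u : Int) : pvLast (p ++ [u]) = u := by
  simp [pvLast, PySem.List.pyGet?_neg_one_append_singleton]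

lemma pvLast_mem (p : List Int) (h : p ≠ []) : pvLast p ∈ p := by
  simp [pvLast, PySem.List.pyGet?_neg_one, List.getLast?_eq_some_getLast h]

lemma pvMaskN_testBit (p : List Int) (j : Nat) :
    (pvMaskN p).testBit j = true ↔ ∃ v ∈ p, v.toNat = j := by
  have aux : ∀ (q : List Int) (acc : Nat) (j : Nat),
      (q.foldl (fun m v => m ||| ((1 : Nat) <<< v.toNat)) acc).testBit j = true ↔
        acc.testBit j = true ∨ ∃ v ∈ q, v.toNat = j := by
    intro q
    induction q with
    | nil => intro acc j; simp
    | cons a t ih =>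
      intro acc j
      rw [List.foldl_cons, ih]
      simp only [Nat.testBit_or, Nat.one_shiftLeft, Nat.testBit_two_pow, Bool.or_eq_true,
        decide_eq_true_eq, List.mem_cons]
      constructor
      · rintro (⟨h | h⟩ | ⟨v, hv, rfl⟩)
        · exact Or.inl h
        · exact Or.inr ⟨a, Or.inl rfl, h⟩
        · exact Or.inr ⟨v, Or.inr hv, rfl⟩
      · rintro (h | ⟨v, hv | hv, rfl⟩)
        · exact Or.inl (Or.inl h)
        · subst hv; exact Or.inl (Or.inr rfl)
        · exact Or.inr ⟨v, hv, rfl⟩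
  rw [pvMaskN, aux]
  simp

lemma pvMaskN_append (p : List Int) (u : Int) :
    pvMaskN (p ++ [u]) = pvMaskN p ||| ((1 : Nat) <<< u.toNat) := by
  simp [pvMaskN, List.foldl_append]

lemma pvFoldl_const_iterate {α : Type} (f : α → α) (x : α) (m : Nat) :
    (List.range m).foldl (fun a _ => f a) x = f^[m] x := by
  induction m generalizing x with
  | zero => simp
  | succ k ih => simp [List.range_succ, List.foldl_append, ih, Function.iterate_succ_apply']

lemma pvDeg_eq (adj : List (Int × List Int)) : ∀ (k : Nat) (v : Int),
    pvDegScanA adj k v = pvDegAllB adj k v := by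
  intro k
  induction k with
  | zero => intro v; rfl
  | succ m ih =>
    intro v
    simp only [pvDegScanA, pvDegAllB, ih]
    split <;> rename_i h <;> simp [decide_eq_true_eq] <;> omega

-- both ports read the last path element through `pyGet? · (-1)`
lemma pvGetLast?_eq (p : List Int) (h : p ≠ []) : p.getLast? = some (pvLast p) := by
  have : pvLast p = p.getLast h := by
    simp [pvLast, PySem.List.pyGet?_neg_one, List.getLast?_eq_some_getLast h]
  rw [this, List.getLast?_eq_some_getLast h]

lemma pvGood_append (n : Int) (adj : List (Int × List Int)) (path : List Int) (nxt : Int)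
    (hgood : pvGood n adj path) (hne : path ≠ []) (hrange : 0 ≤ nxt ∧ nxt < n)
    (hnb : nxt ∈ pvGetAdj adj (pvLast path)) (hnm : nxt ∉ path) :
    pvGood n adj (path ++ [nxt]) := by
  obtain ⟨hh, hnd, hr, hch⟩ := hgood
  refine ⟨?_, ?_, ?_, ?_⟩
  · cases path with
    | nil => simp at hh
    | cons a t => simpa using hh
  · rw [List.nodup_append]
    exact ⟨hnd, List.nodup_singleton nxt, by
      intro a ha b hb; simp at hb; subst hb; exact fun hab => hnm (hab ▸ ha)⟩
  · intro x hx
    rcases List.mem_append.mp hx with h | h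
    · exact hr x h
    · simp at h; subst h; exact hrange
  · rw [List.isChain_append]
    refine ⟨hch, by simp, ?_⟩
    intro a ha y hy
    simp at hy; subst hy
    rw [pvGetLast?_eq path hne] at ha
    simp at ha; subst ha
    exact hnb

lemma pvGood_append_inv (n : Int) (adj : List (Int × List Int)) (path rest' : List Int)
    (nxt : Int) (hne : path ≠ []) (hgood : pvGood n adj (path ++ nxt :: rest')) :
    nxt ∈ pvGetAdj adj (pvLast path) ∧ nxt ∉ path := by
  obtain ⟨hh, hnd, hr, hch⟩ := hgood
  constructor
  · rw [List.isChain_append] at hch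
    have := hch.2.2 (pvLast path) (by simp [pvGetLast?_eq path hne]) nxt (by simp)
    exact this
  · rw [List.nodup_append] at hnd
    intro hmem
    exact hnd.2.2 nxt hmem nxt (by simp) rfl

-- A's backtracking search characterised: it succeeds iff the current path extends to a
-- Hamiltonian path that closes back to 0.
lemma pvBacktrackA_iff (n : Int) (adj : List (Int × List Int))
    (hadj : ∀ p ∈ adj, (0 ≤ p.1 ∧ p.1 < n) → ∀ x ∈ p.2, 0 ≤ x ∧ x < n) (h3 : 3 ≤ n) :
    ∀ (fuel : Nat) (visited : List Bool) (path : List Int),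
      visited.length = n.toNat →
      (∀ u : Nat, u < n.toNat → visited.getD u false = decide ((u : Int) ∈ path)) →
      pvGood n adj path → path ≠ [] → path.length ≤ n.toNat →
      n.toNat - path.length ≤ fuel →
      (pvBacktrackA n.toNat adj fuel visited path = true ↔
        ∃ rest, pvGood n adj (path ++ rest) ∧ (path ++ rest).length = n.toNat ∧
          (0 : Int) ∈ pvGetAdj adj (pvLast (path ++ rest))) := by
  have hclose : ∀ (path : List Int), pvGood n adj path → path.length = n.toNat →
      (pvCloseA adj path = true ↔
        ∃ rest, pvGood n adj (path ++ rest) ∧ (path ++ rest).length = n.toNat ∧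
          (0 : Int) ∈ pvGetAdj adj (pvLast (path ++ rest))) := by
    intro path hgood hlenp
    constructor
    · intro h
      exact ⟨[], by simpa using hgood, by simpa using hlenp,
        by simpa [pvCloseA, pvLast] using h⟩
    · rintro ⟨rest, hg, hl, hc⟩
      have hrest : rest = [] := by
        rw [List.length_append] at hl
        cases rest with
        | nil => rfl
        | cons a t => simp at hl; omega
      subst hrest
      simp only [List.append_nil] at hc
      simpa [pvCloseA, pvLast] using hc
  intro fuel
  induction fuel with
  | zero =>
    intro visited path hlen hvis hgood hne hle hfuel
    have hlenp : path.length = n.toNat := by omega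
    rw [pvBacktrackA, if_pos hlenp]
    exact hclose path hgood hlenp
  | succ f ih =>
    intro visited path hlen hvis hgood hne hle hfuel
    by_cases hlenp : path.length = n.toNat
    · rw [pvBacktrackA, if_pos hlenp]
      exact hclose path hgood hlenp
    · rw [pvBacktrackA, if_neg hlenp]
      have hLdef : (PySem.List.pyGet? path (-1)).getD 0 = pvLast path := rfl
      rw [hLdef, List.any_eq_true]
      have hlast_mem : pvLast path ∈ path := pvLast_mem path hne
      have hlast_range := hgood.2.2.1 _ hlast_mem
      have hnbr := pvNb_range n adj hadj (pvLast path) hlast_range.1 hlast_range.2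
      -- the recursive call with the invariant re-established
      have hstep : ∀ nxt, nxt ∈ pvGetAdj adj (pvLast path) → nxt ∉ path →
          (pvBacktrackA n.toNat adj f (PySem.List.pySetD visited nxt true) (path ++ [nxt]) = true ↔
            ∃ rest', pvGood n adj ((path ++ [nxt]) ++ rest') ∧
              ((path ++ [nxt]) ++ rest').length = n.toNat ∧
              (0 : Int) ∈ pvGetAdj adj (pvLast ((path ++ [nxt]) ++ rest'))) := by
        intro nxt hnb hnm
        have hrange := hnbr nxt hnb
        apply ih
        · rw [PySem.List.pySetD_of_nonneg visited true hrange.1, List.length_set, hlen]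
        · intro u hu
          rw [PySem.List.pySetD_of_nonneg visited true hrange.1]
          by_cases hu0 : u = nxt.toNat
          · subst hu0
            rw [List.getD_eq_getElem _ false (by rw [List.length_set, hlen]; omega),
              List.getElem_set_self (by rw [List.length_set, hlen]; omega)]
            simp [Int.toNat_of_nonneg hrange.1]
          · rw [List.getD_eq_getElem _ false (by rw [List.length_set, hlen]; omega),
              List.getElem_set_ne (by omega) (by rw [List.length_set, hlen]; omega)]
            have hv := hvis u hu
            rw [List.getD_eq_getElem _ false (by rw [hlen]; omega)] at hv
            rw [hv]
            have : ((u : Int) ∈ path ++ [nxt]) ↔ (u : Int) ∈ path := by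
              simp only [List.mem_append, List.mem_singleton]
              constructor
              · rintro (h | h)
                · exact h
                · exfalso; apply hu0; omega
              · exact Or.inl
            simp [this]
        · exact pvGood_append n adj path nxt hgood hne hrange hnb hnm
        · simp
        · simp; omega
        · simp; omega
      constructor
      · rintro ⟨nxt, hmem, hand⟩
        rw [PySem.List.mem_sorted] at hmem
        have hrange := hnbr nxt hmem
        rw [Bool.and_eq_true, Bool.not_eq_true'] at hand
        obtain ⟨hnv, hrec⟩ := hand
        have hlt : nxt < (visited.length : Int) := by rw [hlen]; omega
        rw [PySem.List.pyGet?_eq_some_getElem visited hrange.1 hlt] at hnv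
        simp only [Option.getD_some] at hnv
        have hnotmem : nxt ∉ path := by
          have hv := hvis nxt.toNat (by omega)
          rw [List.getD_eq_getElem _ false (by rw [hlen]; omega)] at hv
          rw [hnv] at hv
          rw [Int.toNat_of_nonneg hrange.1] at hv
          intro hmemp
          simp [hmemp] at hv
        rw [hstep nxt hmem hnotmem] at hrec
        obtain ⟨rest', h1, h2, h3'⟩ := hrec
        refine ⟨nxt :: rest', ?_, ?_, ?_⟩
        · rwa [List.append_assoc, List.singleton_append] at h1
        · rwa [List.append_assoc, List.singleton_append] at h2
        · rwa [List.append_assoc, List.singleton_append] at h3'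
      · rintro ⟨rest, hg, hl, hc⟩
        have hrest : rest ≠ [] := by
          intro h; subst h; simp at hl; omega
        obtain ⟨nxt, rest', rfl⟩ := List.exists_cons_of_ne_nil hrest
        obtain ⟨hnb, hnm⟩ := pvGood_append_inv n adj path rest' nxt hne hg
        have hrange := hnbr nxt hnb
        refine ⟨nxt, by rw [PySem.List.mem_sorted]; exact hnb, ?_⟩
        rw [Bool.and_eq_true, Bool.not_eq_true']
        constructor
        · have hlt : nxt < (visited.length : Int) := by rw [hlen]; omega
          rw [PySem.List.pyGet?_eq_some_getElem visited hrange.1 hlt]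
          simp only [Option.getD_some]
          have hv := hvis nxt.toNat (by omega)
          rw [List.getD_eq_getElem _ false (by rw [hlen]; omega)] at hv
          rw [Int.toNat_of_nonneg hrange.1] at hv
          simp [hnm] at hv
          exact hv
        · rw [hstep nxt hnb hnm]
          refine ⟨rest', ?_, ?_, ?_⟩
          · rwa [List.append_assoc, List.singleton_append]
          · rwa [List.append_assoc, List.singleton_append]
          · rwa [List.append_assoc, List.singleton_append]

-- B's test `not (mask >> u) & 1` decides non-membership of u in the path behind the mask
lemma pvBit_iff (p : List Int) (u : Int) (hp0 : ∀ x ∈ p, 0 ≤ x) (hu : 0 ≤ u) :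
    ((PySem.Int.band (((pvMaskN p : Nat) : Int) >>> (u.toNat : Nat)) 1 == 0) = true) ↔ u ∉ p := by
  have hcast : (((pvMaskN p : Nat) : Int) >>> (u.toNat : Nat)) = ((pvMaskN p >>> u.toNat : Nat) : Int) := rfl
  have hband : PySem.Int.band ((pvMaskN p >>> u.toNat : Nat) : Int) 1 =
      (((pvMaskN p >>> u.toNat) &&& 1 : Nat) : Int) := by
    exact_mod_cast PySem.Int.band_natCast (pvMaskN p >>> u.toNat) 1
  rw [hcast]
  simp only [beq_iff_eq, hband, Int.natCast_eq_zero]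
  have key : ((pvMaskN p >>> u.toNat) &&& 1 = 0) ↔ (pvMaskN p).testBit u.toNat = false := by
    rw [Nat.and_one_is_mod, ← Nat.decide_shiftRight_mod_two_eq_one]
    rcases Nat.mod_two_eq_zero_or_one (pvMaskN p >>> u.toNat) with h | h <;> simp [h]
  rw [key]
  constructor
  · intro h hmem
    rw [(pvMaskN_testBit p u.toNat).mpr ⟨u, hmem, rfl⟩] at h
    cases h
  · intro hnm
    by_contra h
    rw [Bool.not_eq_false] at h
    obtain ⟨v, hv, hvt⟩ := (pvMaskN_testBit p u.toNat).mp h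
    have hv0 := hp0 v hv
    have hvu : v = u := by omega
    exact hnm (hvu ▸ hv)

-- B's mask update `mask | (1 << u)` is the Nat mask of the extended path
lemma pvMask_bor (p : List Int) (u : Int) :
    PySem.Int.bor (((pvMaskN p : Nat) : Int)) ((1 : Int) <<< ((u.toNat : Nat) : Int)) =
      ((pvMaskN (p ++ [u]) : Nat) : Int) := by
  rw [pvMaskN_append]
  have h1 : ((1 : Int) <<< ((u.toNat : Nat) : Int)) = (((1 : Nat) <<< u.toNat : Nat) : Int) :=
    Int.shiftLeft_natCast 1 u.toNat
  rw [h1]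
  exact_mod_cast PySem.Int.bor_natCast (pvMaskN p) ((1 : Nat) <<< u.toNat)

-- B's frontier characterised: after k steps it holds exactly the (bitmask, endpoint)
-- states of the simple paths of length k+1 that start at 0.
lemma pvFrontier_iff (n : Int) (adj : List (Int × List Int))
    (hadj : ∀ p ∈ adj, (0 ≤ p.1 ∧ p.1 < n) → ∀ x ∈ p.2, 0 ≤ x ∧ x < n) (h3 : 3 ≤ n) :
    ∀ (k : Nat) (x : Int × Int),
      (x ∈ (pvStepB adj)^[k] (PySem.Set.ofList [((1 : Int), (0 : Int))])) ↔
        ∃ p, pvGood n adj p ∧ p.length = k + 1 ∧ x = ((pvMaskN p : Int), pvLast p) := by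
  intro k
  induction k with
  | zero =>
    intro x
    rw [Function.iterate_zero_apply, PySem.Set.mem_ofList, List.mem_singleton]
    constructor
    · rintro rfl
      refine ⟨[0], ⟨rfl, List.nodup_singleton 0, ?_, by simp⟩, rfl, by decide⟩
      intro y hy; simp at hy; subst hy; exact ⟨le_refl 0, by omega⟩
    · rintro ⟨p, hgood, hlen, rfl⟩
      match p, hlen with
      | [a], _ =>
        have : a = 0 := by simpa using hgood.1
        subst this; decide
  | succ k ih =>
    intro x
    rw [Function.iterate_succ_apply']
    unfold pvStepB
    rw [PySem.Set.mem_ofList, List.mem_flatMap]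
    constructor
    · rintro ⟨s, hs, hx⟩
      rw [List.mem_map] at hx
      obtain ⟨u, hu, rfl⟩ := hx
      rw [List.mem_filter] at hu
      obtain ⟨hunb, hucond⟩ := hu
      obtain ⟨p, hgood, hlen, rfl⟩ := (ih s).mp hs
      dsimp only at hunb hucond ⊢
      have hpne : p ≠ [] := by intro h; subst h; simp at hlen
      have hlast_mem : pvLast p ∈ p := pvLast_mem p hpne
      have hlast_range := hgood.2.2.1 _ hlast_mem
      have hrange := pvNb_range n adj hadj (pvLast p) hlast_range.1 hlast_range.2 u hunb
      have hnm : u ∉ p :=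
        (pvBit_iff p u (fun y hy => (hgood.2.2.1 y hy).1) hrange.1).mp hucond
      refine ⟨p ++ [u], pvGood_append n adj p u hgood hpne hrange hunb hnm, by simp; omega, ?_⟩
      rw [pvLast_append, pvMask_bor]
    · rintro ⟨q, hgood, hlen, rfl⟩
      have hqne : q ≠ [] := by intro h; subst h; simp at hlen
      set u := q.getLast hqne with hudef
      have hq : q.dropLast ++ [u] = q := List.dropLast_append_getLast hqne
      set p := q.dropLast with hpdef
      have hplen : p.length = k + 1 := by
        have := congrArg List.length hq
        simp at this; omega
      have hpne : p ≠ [] := by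
        intro h; rw [h] at hplen; simp at hplen
      have hgoodp : pvGood n adj p := by
        obtain ⟨hh, hnd, hr, hch⟩ := hgood
        rw [← hq] at hh hnd hr hch
        refine ⟨?_, (List.nodup_append.mp hnd).1, fun y hy => hr y (List.mem_append_left _ hy), (List.isChain_append.mp hch).1⟩
        cases hp : p with
        | nil => exact absurd hp hpne
        | cons a t => rw [hp] at hh; simpa using hh
      have hinv : u ∈ pvGetAdj adj (pvLast p) ∧ u ∉ p := by
        apply pvGood_append_inv n adj p [] u hpne
        rw [show p ++ u :: [] = p ++ [u] from rfl, hq]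
        exact hgood
      have hrange : 0 ≤ u ∧ u < n := hgood.2.2.1 u (by rw [← hq]; simp)
      refine ⟨(((pvMaskN p : Nat) : Int), pvLast p), ?_, ?_⟩
      · exact (ih _).mpr ⟨p, hgoodp, hplen, rfl⟩
      · rw [List.mem_map]
        refine ⟨u, ?_, ?_⟩
        · rw [List.mem_filter]
          exact ⟨hinv.1, (pvBit_iff p u (fun y hy => (hgoodp.2.2.1 y hy).1) hrange.1).mpr hinv.2⟩
        · rw [pvMask_bor, ← hq, pvLast_append]

-- the degree scan read back as a property of the graph
lemma pvDegAllB_spread (adj : List (Int × List Int)) : ∀ (k : Nat) (v0 : Int),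
    pvDegAllB adj k v0 = true →
    ∀ v, v0 ≤ v → v < v0 + k → 2 ≤ (pvGetAdj adj v).length := by
  intro k
  induction k with
  | zero => intro v0 _ v h1 h2; exact absurd h2 (by push_cast; omega)
  | succ m ih =>
    intro v0 h v h1 h2
    rw [pvDegAllB, Bool.and_eq_true, decide_eq_true_eq] at h
    by_cases hv : v = v0
    · subst hv; exact h.1
    · exact ih (v0 + 1) h.2 v (by omega) (by push_cast at h2 ⊢; omega)

-- a graph whose vertices 0..n-1 all list ≥ 2 neighbours has at least n entries
lemma pvDeg_length (n : Int) (adj : List (Int × List Int))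
    (hdeg : ∀ v, 0 ≤ v → v < n → 2 ≤ (pvGetAdj adj v).length) : n ≤ adj.length := by
  have hsub : PySem.List.pyRange 0 n 1 ⊆ adj.map Prod.fst := by
    intro v hv
    rw [PySem.List.mem_pyRange_one] at hv
    have h2 := hdeg v hv.1 hv.2
    unfold pvGetAdj at h2
    cases hfind : adj.find? (fun p => p.1 == v) with
    | none => rw [hfind] at h2; simp at h2
    | some q =>
      have hmem := List.mem_of_find?_eq_some hfind
      have hkey : q.1 = v := by have := List.find?_some hfind; simpa using this
      rw [List.mem_map]
      exact ⟨q, hmem, hkey⟩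
  have hlen : (PySem.List.pyRange 0 n 1).length ≤ (adj.map Prod.fst).length := by
    calc (PySem.List.pyRange 0 n 1).length
        = (PySem.List.pyRange 0 n 1).toFinset.card :=
          (List.toFinset_card_of_nodup (PySem.List.nodup_pyRange_one 0 n)).symm
      _ ≤ (adj.map Prod.fst).toFinset.card :=
          Finset.card_le_card (by intro x hx; simp only [List.mem_toFinset] at hx ⊢; exact hsub hx)
      _ ≤ (adj.map Prod.fst).length := (adj.map Prod.fst).toFinset_card_le
  rw [PySem.List.length_pyRange_one, List.length_map] at hlen
  omega

-- ===== VERDICT (by name: the statement is the Claim_ definition above) =====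
theorem has_hamiltonian_circuit_bt_spec : Claim_equal_has_hamiltonian_circuit_bt := by
  intro n adj _hdom hpre
  unfold Spec_has_hamiltonian_circuit_bt has_hamiltonian_circuit_bt has_hamiltonian_circuit_bt_alt
  by_cases hn : n < 3
  · rw [if_pos hn, if_pos hn]
  · rw [if_neg hn, if_neg hn, pvDeg_eq adj n.toNat 0]
    have h3 : 3 ≤ n := by omega
    have h3t : 3 ≤ n.toNat := by omega
    by_cases hdeg : pvDegAllB adj n.toNat 0 = true
    · rw [hdeg]
      have hdegP : ∀ v, 0 ≤ v → v < n → 2 ≤ (pvGetAdj adj v).length := by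
        intro v h0 hv
        exact pvDegAllB_spread adj n.toNat 0 hdeg v h0 (by omega)
      have hadj := hpre h3 ⟨pvDeg_length n adj hdegP, by
        intro v hv
        rw [PySem.List.mem_pyRange_one] at hv
        exact hdegP v hv.1 hv.2⟩
      simp only [Bool.not_true, Bool.false_eq_true, if_false]
      rw [pvFoldl_const_iterate, Bool.eq_iff_iff]
      -- A side
      have hA := pvBacktrackA_iff n adj hadj h3 n.toNat
        (PySem.List.pySetD (List.replicate n.toNat false) 0 true) [0]
        (by rw [PySem.List.pySetD_of_nonneg _ true (by omega : (0:Int) ≤ 0)]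
            simp)
        (by intro u hu
            rw [PySem.List.pySetD_of_nonneg _ true (by omega : (0:Int) ≤ 0)]
            rw [List.getD_eq_getElem _ false (by simpa using hu)]
            rw [List.getElem_set (by simpa using hu)]
            by_cases hu0 : u = 0
            · subst hu0; simp
            · have : ¬ ((0 : Nat) = u) := fun h => hu0 h.symm
              simp only [Int.toNat_zero, this, if_false, List.getElem_replicate]
              have : ¬ ((u : Int) ∈ [(0 : Int)]) := by simp; omega
              simp [this])
        (by refine ⟨rfl, List.nodup_singleton 0, ?_, by simp⟩
            intro y hy; simp at hy; subst hy; exact ⟨le_refl 0, by omega⟩)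
        (by simp)
        (by simp; omega)
        (by simp)
      rw [hA]
      -- B side
      rw [List.any_eq_true]
      constructor
      · rintro ⟨rest, hg, hl, hc⟩
        refine ⟨(((pvMaskN ((0 : Int) :: rest) : Nat) : Int), pvLast ((0 : Int) :: rest)), ?_, ?_⟩
        · rw [pvFrontier_iff n adj hadj h3]
          refine ⟨(0 : Int) :: rest, hg, ?_, rfl⟩
          simp at hl ⊢
          omega
        · simpa using hc
      · rintro ⟨s, hs, hc⟩
        rw [pvFrontier_iff n adj hadj h3] at hs
        obtain ⟨p, hg, hl, rfl⟩ := hs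
        have hlp : p.length = n.toNat := by omega
        obtain ⟨t, rfl⟩ : ∃ t, p = (0 : Int) :: t := by
          cases p with
          | nil => simp at hl
          | cons a t =>
            have : a = 0 := by simpa using hg.1
            exact ⟨t, by rw [this]⟩
        refine ⟨t, hg, by simpa using hlp, by simpa using hc⟩
    · rw [Bool.not_eq_true] at hdeg
      rw [hdeg]
      simp
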